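-- pv_equiv track=rewrite | github.com/wikimedia/operations-debs-contenttranslation-hfst | scripts/finnish-tagtools/finnpos-restore-lemma.py | compile_dict
-- ===== SOURCE A (Python) =====
-- def part_count(lemma):
--     return lemma.count('#')
--
-- def compile_dict(label_lemma_pairs):
--     res = {}
--
--     for label, lemma in label_lemma_pairs:
--         if label in res:
--             old_lemma = res[label]
--
--             if part_count(old_lemma) > part_count(lemma):
--                 res[label] = lemma
--         else:
--             res[label] = lemma
--
--     return res
-- ===== SOURCE B (Python) =====
-- def part_count(lemma):
--     return lemma.count('#')
--
-- def compile_dict(label_lemma_pairs):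
--     groups = {}
--     for label, lemma in label_lemma_pairs:
--         groups.setdefault(label, []).append(lemma)
--     return {label: min(lemmas, key=part_count)
--             for label, lemmas in groups.items()}
-- ===== Notes on version B (the rewrite author's own statement) =====
-- stated objective: idiomatic
-- what changed: Instead of maintaining a running best lemma with an in-loop comparison, B first groups all lemmas per label with setdefault/append and then picks each label's lemma with min(key=part_count), whose first-minimum-wins rule reproduces A's strict-'>' tie behaviour.
import Mathlib
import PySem

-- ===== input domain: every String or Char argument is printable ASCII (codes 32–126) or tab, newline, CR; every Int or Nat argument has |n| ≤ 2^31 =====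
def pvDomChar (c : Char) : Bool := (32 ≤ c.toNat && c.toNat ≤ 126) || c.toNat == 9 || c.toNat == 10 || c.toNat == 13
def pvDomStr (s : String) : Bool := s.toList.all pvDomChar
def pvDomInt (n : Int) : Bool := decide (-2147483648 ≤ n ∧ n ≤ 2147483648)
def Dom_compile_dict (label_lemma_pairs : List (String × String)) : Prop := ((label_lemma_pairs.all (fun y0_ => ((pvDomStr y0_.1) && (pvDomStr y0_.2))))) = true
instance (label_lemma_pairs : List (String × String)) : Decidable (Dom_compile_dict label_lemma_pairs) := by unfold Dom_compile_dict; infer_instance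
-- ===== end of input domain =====

-- B groups the lemmas per label first and then takes min(·, key=part_count) per label (idiomatic two-pass decomposition); A keeps a running best per label.

-- ===== PORT A =====
def part_count (lemma_ : String) : Int := (PySem.Str.count lemma_ "#" : Int)

def compile_dict (label_lemma_pairs : List (String × String)) : List (String × String) :=
  (label_lemma_pairs.foldl
    (fun res p =>
      -- 'if label in res: old_lemma = res[label] …' ported as a match on res.get? (some = key present)
      match res.get? p.1 with
      | some old_lemma =>
          if part_count old_lemma > part_count p.2 then res.insert p.1 p.2 else res
      | none => res.insert p.1 p.2)
    PySem.Dict.empty).items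

-- ===== PORT B =====
def part_count_alt (lemma_ : String) : Int := (PySem.Str.count lemma_ "#" : Int)

def compile_dict_alt (label_lemma_pairs : List (String × String)) : List (String × String) :=
  ((label_lemma_pairs.foldl
      (fun groups p => groups.modify p.1 [] (fun ls => ls ++ [p.2]))  -- setdefault(label, []).append(lemma)
      PySem.Dict.empty).items).map
    (fun g => (g.1, PySem.List.minD g.2 part_count_alt ""))  -- min(lemmas, key=part_count); lemmas is never empty

-- ===== PRECONDITION & SPEC =====
def Spec_compile_dict (label_lemma_pairs : List (String × String)) (out : List (String × String)) : Prop := out = compile_dict_alt label_lemma_pairs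
instance (label_lemma_pairs : List (String × String)) (out : List (String × String)) : Decidable (Spec_compile_dict label_lemma_pairs out) := by unfold Spec_compile_dict; infer_instance

-- ===== CLAIM (what is proved, stated in full; the proofs are below) =====
def Claim_equal_compile_dict : Prop := ∀ (label_lemma_pairs : List (String × String)), Dom_compile_dict label_lemma_pairs → Spec_compile_dict label_lemma_pairs (compile_dict label_lemma_pairs)

-- ===== LEMMAS AND PROOFS =====

-- A's loop body, named for the proofs
def stepA (res : PySem.Dict String String) (p : String × String) : PySem.Dict String String :=
  match res.get? p.1 with
  | some old_lemma =>
      if part_count old_lemma > part_count p.2 then res.insert p.1 p.2 else res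
  | none => res.insert p.1 p.2

-- A's dict looks up, at each key c, the first-minimum (by part_count) of the lemmas filed under c
theorem A_get? (l : List (String × String)) (d : PySem.Dict String String) (c : String) :
    (l.foldl stepA d).get? c
      = ((l.filter (fun p => p.1 == c)).map (fun p => p.2)).foldl
          (fun acc x => match acc with
            | none => some x
            | some m => if part_count_alt x < part_count_alt m then some x else some m)
          (d.get? c) := by
  induction l generalizing d with
  | nil => rfl
  | cons p t ih =>
    simp only [List.foldl_cons, List.filter_cons]
    rw [ih]
    by_cases hc : p.1 = c
    · subst hc
      simp only [beq_self_eq_true, if_pos, List.map_cons, List.foldl_cons]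
      cases h : d.get? p.1 with
      | none =>
        simp [stepA, h, PySem.Dict.get?_insert_self]
      | some old =>
        have hpc : part_count_alt = part_count := rfl
        simp only [stepA, h, gt_iff_lt, hpc]
        by_cases hlt : part_count p.2 < part_count old
        · simp [hlt, PySem.Dict.get?_insert_self]
        · simp [hlt, h]
    · have hbeq : (p.1 == c) = false := beq_eq_false_iff_ne.mpr hc
      simp only [hbeq, Bool.false_eq_true, if_neg, not_false_iff]
      have hg : (stepA d p).get? c = d.get? c := by
        unfold stepA
        cases h : d.get? p.1 with
        | none => rw [PySem.Dict.get?_insert_of_ne _ _ (fun hcc => hc hcc.symm)]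
        | some old =>
          by_cases hgt : part_count old > part_count p.2
          · simp only [hgt, if_pos]
            rw [PySem.Dict.get?_insert_of_ne _ _ (fun hcc => hc hcc.symm)]
          · simp [hgt]
      rw [hg]

-- A's dict has the labels as keys, in first-appearance order
theorem A_keys (l : List (String × String)) (d : PySem.Dict String String) :
    (l.foldl stepA d).keys = PySem.Set.update d.keys (l.map (fun p => p.1)) := by
  induction l generalizing d with
  | nil => rfl
  | cons p t ih =>
    simp only [List.foldl_cons, List.map_cons]
    rw [ih]
    have hk : (stepA d p).keys = PySem.Set.add d.keys p.1 := by
      unfold stepA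
      cases h : d.get? p.1 with
      | none =>
        have hcf : d.contains p.1 = false := (PySem.Dict.get?_eq_none_iff_contains d p.1).mp h
        have hnm : p.1 ∉ d.keys := fun hmem => by
          rw [(PySem.Dict.contains_iff_mem_keys d p.1).mpr hmem] at hcf
          cases hcf
        rw [PySem.Dict.keys_insert_of_not_contains d p.2 hcf]
        simp [PySem.Set.add, PySem.Set.contains, hnm]
      | some old =>
        have hct : d.contains p.1 = true := by
          cases hcc : d.contains p.1
          · rw [(PySem.Dict.get?_eq_none_iff_contains d p.1).mpr hcc] at h; cases h
          · rfl
        have hmem : p.1 ∈ d.keys := (PySem.Dict.contains_iff_mem_keys d p.1).mp hct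
        by_cases hgt : part_count old > part_count p.2
        · simp only [hgt, if_pos]
          rw [PySem.Dict.keys_insert_of_contains d p.2 hct]
          simp [PySem.Set.add, PySem.Set.contains, hmem]
        · simp [hgt, PySem.Set.add, PySem.Set.contains, hmem]
    rw [hk]
    rfl

-- ===== VERDICT (by name: the statement is the Claim_ definition above) =====
theorem compile_dict_spec : Claim_equal_compile_dict := by
  intro pairs _
  unfold Spec_compile_dict compile_dict compile_dict_alt
  have hfold : ∀ res, pairs.foldl
      (fun res p =>
        match res.get? p.1 with
        | some old_lemma =>
            if part_count old_lemma > part_count p.2 then res.insert p.1 p.2 else res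
        | none => res.insert p.1 p.2) res = pairs.foldl stepA res := fun _ => rfl
  rw [hfold]
  -- both dicts have the same key list, in first-appearance order
  have hkA : (pairs.foldl stepA PySem.Dict.empty).keys
      = PySem.Set.ofList (pairs.map (fun p => p.1)) := by
    rw [A_keys, PySem.Set.ofList_eq_foldl]; rfl
  have hkB : (pairs.foldl (fun groups p => groups.modify p.1 [] (fun ls => ls ++ [p.2]))
        (PySem.Dict.empty : PySem.Dict String (List String))).keys
      = PySem.Set.ofList (pairs.map (fun p => p.1)) := by
    rw [PySem.Dict.keys_foldl_modify_key pairs (fun p => p.1) [] (fun _ p => fun ls => ls ++ [p.2]),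
        PySem.Set.ofList_eq_foldl]
    rfl
  have hndA : (pairs.foldl stepA PySem.Dict.empty).keys.Nodup := by
    rw [hkA]; exact PySem.Set.nodup_ofList _
  have hndB : (pairs.foldl (fun groups p => groups.modify p.1 [] (fun ls => ls ++ [p.2]))
      (PySem.Dict.empty : PySem.Dict String (List String))).keys.Nodup := by
    rw [hkB]; exact PySem.Set.nodup_ofList _
  rw [PySem.Dict.items_eq_map_keys _ hndA "",
      PySem.Dict.items_eq_map_keys _ hndB [], hkA, hkB, List.map_map]
  apply List.map_congr_left
  intro k _
  have hB : (pairs.foldl (fun groups p => groups.modify p.1 [] (fun ls => ls ++ [p.2]))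
        (PySem.Dict.empty : PySem.Dict String (List String))).getD k []
      = (pairs.filter (fun p => p.1 == k)).map (fun p => p.2) := by
    rw [PySem.Dict.getD_foldl_modify_append]
    simp [PySem.Dict.getD_empty]
  have hA : (pairs.foldl stepA PySem.Dict.empty).getD k ""
      = PySem.List.minD ((pairs.filter (fun p => p.1 == k)).map (fun p => p.2)) part_count_alt "" := by
    rw [PySem.Dict.getD_eq_get?_getD, A_get?]
    simp only [PySem.List.minD, PySem.List.min?, PySem.Dict.get?_empty]
    congr 1
    apply PySem.List.foldl_congr_mem
    intro acc x _
    cases acc <;> rfl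
  simp only [Function.comp]
  rw [hA, hB]
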